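-- pv_equiv track=rewrite | github.com/MarcoGarlet/AdventOfCode | 2024/day09/pt2.py | merge_space
-- ===== SOURCE A (Python) =====
-- from functools import reduce
--
-- def merge_space(disk_map):
--     disk_map_copy = []
--     free_blocks = []
--
--     for i in range(len(disk_map)):
--         if(disk_map[i][0]=='.'):
--             free_blocks.append(disk_map[i])
--         else:
--             if(len(free_blocks)>0):
--                 free_blocks = list(reduce(lambda x,y:x+y, free_blocks))
--                 disk_map_copy.append(free_blocks)
--                 free_blocks = []
--             disk_map_copy.append(disk_map[i])
--     if len(free_blocks)>0:
--         free_blocks = list(reduce(lambda x,y:x+y, free_blocks))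
--         disk_map_copy.append(free_blocks)
--
--     return disk_map_copy
-- ===== SOURCE B (Python) =====
-- def merge_space(disk_map):
--     out = []
--     i, n = 0, len(disk_map)
--     while i < n:
--         if disk_map[i][0] != '.':
--             out.append(disk_map[i])
--             i += 1
--         else:
--             j = i
--             while j < n and disk_map[j][0] == '.':
--                 j += 1
--             out.append([x for blk in disk_map[i:j] for x in blk])
--             i = j
--     return out
-- ===== Notes on version B (the rewrite author's own statement) =====
-- stated objective: alternative
-- what changed: B scans with explicit indices and two pointers: at a free block it advances a second pointer to the end of the maximal free run and emits the flattened slice at once, instead of A's buffered pass that accumulates pending free blocks and flushes them with reduce at the next data block and after the loop.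
import Mathlib
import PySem

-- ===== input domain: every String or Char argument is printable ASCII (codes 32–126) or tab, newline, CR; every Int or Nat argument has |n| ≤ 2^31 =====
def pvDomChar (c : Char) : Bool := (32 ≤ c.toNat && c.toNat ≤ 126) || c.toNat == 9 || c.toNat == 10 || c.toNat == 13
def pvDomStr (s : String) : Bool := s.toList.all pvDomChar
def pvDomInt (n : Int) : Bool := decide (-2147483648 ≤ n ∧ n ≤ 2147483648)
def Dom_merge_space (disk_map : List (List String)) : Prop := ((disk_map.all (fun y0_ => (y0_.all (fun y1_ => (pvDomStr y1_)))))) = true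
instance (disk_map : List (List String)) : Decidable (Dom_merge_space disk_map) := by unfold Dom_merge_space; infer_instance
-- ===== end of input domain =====

-- B replaces A's pending-free buffer (flushed with reduce) by an explicit two-pointer index scan that emits each maximal free run as one flattened slice; same asymptotic cost.


-- ===== PORT A =====
-- loop state: (disk_map_copy, free_blocks); reduce(+) on the nonempty free_blocks = flatten
def isFreeB (b : List String) : Bool := PySem.List.pyGet? b 0 = some "."

def mergeStepA (st : List (List String) × List (List String)) (b : List String) :
    List (List String) × List (List String) :=
  if PySem.List.pyGet? b 0 = some "." then (st.1, st.2 ++ [b])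
  else if st.2.length > 0 then (st.1 ++ [st.2.flatten] ++ [b], [])
  else (st.1 ++ [b], [])

def merge_space (disk_map : List (List String)) : List (List String) :=
  let st := disk_map.foldl mergeStepA ([], [])
  if st.2.length > 0 then st.1 ++ [st.2.flatten] else st.1

-- ===== PORT B =====
-- inner while loop 'while j < n and disk_map[j][0]== ".": j += 1', as structural recursion on a
-- step counter (each iteration moves j up by 1, so n steps always suffice); the guard j < n keeps getD in range, so it is exact
def scanB (dm : List (List String)) (n : Nat) : Nat → Nat → Nat
  | 0, j => j
  | fuel + 1, j => if j < n ∧ isFreeB (dm.getD j []) then scanB dm n fuel (j + 1) else j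

-- outer while loop of Source B, same fuel scheme (i strictly increases each iteration); the guard i < n keeps getD in range
def loopB (dm : List (List String)) (n : Nat) : Nat → Nat → List (List String) → List (List String)
  | 0, _, out => out
  | fuel + 1, i, out =>
    if i < n then
      if isFreeB (dm.getD i []) = false then
        loopB dm n fuel (i + 1) (out ++ [dm.getD i []])
      else
        let j := scanB dm n n i
        loopB dm n fuel j (out ++ [((dm.drop i).take (j - i)).flatten])
    else out

def merge_space_alt (disk_map : List (List String)) : List (List String) :=
  loopB disk_map disk_map.length disk_map.length 0 []

-- ===== PRECONDITION & SPEC =====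
-- Pre_ excludes inputs containing an empty block, on which Python A (and B) raise IndexError at b[0]
def Pre_merge_space (disk_map : List (List String)) : Prop :=
  ∀ b ∈ disk_map, b ≠ []

instance (disk_map : List (List String)) : Decidable (Pre_merge_space disk_map) := by
  unfold Pre_merge_space; infer_instance

def pvWitness_merge_space : List (List String) := [["0"], ["."], [".", "."], ["1", "2"]]

def Spec_merge_space (disk_map : List (List String)) (out : List (List String)) : Prop := out = merge_space_alt disk_map
instance (disk_map : List (List String)) (out : List (List String)) : Decidable (Spec_merge_space disk_map out) := by unfold Spec_merge_space; infer_instance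

-- ===== CLAIM (what is proved, stated in full; the proofs are below) =====
def Claim_equal_merge_space : Prop := ∀ (disk_map : List (List String)), Dom_merge_space disk_map → Pre_merge_space disk_map → Spec_merge_space disk_map (merge_space disk_map)

-- ===== LEMMAS AND PROOFS =====

-- reference recursion: A's loop with pending free blocks, written structurally
def goM : List (List String) → List (List String) → List (List String)
  | free, [] => if free.length > 0 then [free.flatten] else []
  | free, b :: rest =>
    if isFreeB b then goM (free ++ [b]) rest
    else (if free.length > 0 then [free.flatten, b] else [b]) ++ goM [] rest

theorem foldA_eq_goM (l acc free :_) :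
    (if (l.foldl mergeStepA (acc, free)).2.length > 0
      then (l.foldl mergeStepA (acc, free)).1 ++ [(l.foldl mergeStepA (acc, free)).2.flatten]
      else (l.foldl mergeStepA (acc, free)).1) = acc ++ goM free l := by
  induction l generalizing acc free with
  | nil => simp [goM]; split <;> simp
  | cons b rest ih =>
    simp only [List.foldl_cons, goM, mergeStepA, isFreeB]
    by_cases hb : PySem.List.pyGet? b 0 = some "."
    · simp [hb, ih]
    · by_cases hf : free.length > 0 <;> simp [hb, hf, ih]

-- goM never inspects the pending blocks individually: it flushes them as one flattened prefix
theorem goM_span (l : List (List String)) (acc : List (List String)) :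
    goM acc l =
      (if acc ++ l.takeWhile isFreeB = [] then [] else [(acc ++ l.takeWhile isFreeB).flatten])
        ++ goM [] (l.dropWhile isFreeB) := by
  induction l generalizing acc with
  | nil =>
    by_cases h : acc = [] <;>
      simp [goM, h, List.length_pos_of_ne_nil]
  | cons b rest ih =>
    by_cases hb : isFreeB b
    · rw [goM, if_pos hb, ih, List.takeWhile_cons_of_pos hb, List.dropWhile_cons_of_pos hb]
      simp
    · rw [goM, if_neg hb, List.takeWhile_cons_of_neg hb, List.dropWhile_cons_of_neg hb]
      have hgo : goM [] (b :: rest) = [b] ++ goM [] rest := by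
        rw [goM, if_neg hb]; simp
      rw [hgo]
      by_cases h : acc = []
      · simp [h]
      · simp [h, List.length_pos_of_ne_nil]

-- the inner scan ends exactly after the maximal free run starting at j (fuel covers the remaining indices)
theorem scanB_spec (dm : List (List String)) (fuel j : Nat) (hfj : dm.length ≤ j + fuel) :
    scanB dm dm.length fuel j = j + ((dm.drop j).takeWhile isFreeB).length := by
  induction fuel generalizing j with
  | zero =>
    rw [List.drop_eq_nil_of_le (by omega)]
    simp [scanB]
  | succ fuel ih =>
    rw [scanB]
    by_cases h : j < dm.length ∧ isFreeB (dm.getD j [])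
    · rw [if_pos h, ih (j + 1) (by omega)]
      have hget : dm.getD j [] = dm[j] := List.getD_eq_getElem dm [] h.1
      rw [List.drop_eq_getElem_cons h.1, List.takeWhile_cons_of_pos (by rw [← hget]; exact h.2)]
      simp; omega
    · rw [if_neg h]
      by_cases hl : j < dm.length
      · have hget : dm.getD j [] = dm[j] := List.getD_eq_getElem dm [] hl
        have hnf : ¬ isFreeB dm[j] := by rw [← hget]; tauto
        rw [List.drop_eq_getElem_cons hl, List.takeWhile_cons_of_neg (by simpa using hnf)]
        simp
      · rw [List.drop_eq_nil_of_le (by omega)]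
        simp

theorem drop_length_takeWhile_eq_dropWhile (l : List (List String)) :
    l.drop (l.takeWhile isFreeB).length = l.dropWhile isFreeB := by
  induction l with
  | nil => rfl
  | cons a t ih =>
    by_cases ha : isFreeB a
    · simp [List.takeWhile_cons_of_pos ha, List.dropWhile_cons_of_pos ha, ih]
    · simp [List.takeWhile_cons_of_neg ha, List.dropWhile_cons_of_neg ha]

theorem loopB_eq (dm : List (List String)) (fuel i : Nat) (out : List (List String))
    (hfi : dm.length ≤ i + fuel) :
    loopB dm dm.length fuel i out = out ++ goM [] (dm.drop i) := by
  induction fuel generalizing i out with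
  | zero =>
    rw [List.drop_eq_nil_of_le (by omega)]
    simp [loopB, goM]
  | succ fuel ih =>
    by_cases h : i < dm.length
    · have hdrop : dm.drop i = dm[i] :: dm.drop (i + 1) := List.drop_eq_getElem_cons h
      have hget : dm.getD i [] = dm[i] := List.getD_eq_getElem dm [] h
      rw [loopB, if_pos h]
      by_cases hf : isFreeB (dm.getD i []) = false
      · rw [if_pos hf, ih (i + 1) _ (by omega), hget]
        rw [hget] at hf
        rw [hdrop, goM, if_neg (by simp [hf])]
        simp
      · rw [if_neg hf]
        have hfree : isFreeB (dm.getD i []) = true := by simpa using hf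
        have hjv : scanB dm dm.length dm.length i = i + ((dm.drop i).takeWhile isFreeB).length :=
          scanB_spec dm dm.length i (by omega)
        have htw : (dm.drop i).takeWhile isFreeB ≠ [] := by
          rw [hdrop, List.takeWhile_cons_of_pos (by rw [← hget]; exact hfree)]
          simp
        have htwl : 1 ≤ ((dm.drop i).takeWhile isFreeB).length := by
          have := List.length_pos_of_ne_nil htw; omega
        rw [ih (scanB dm dm.length dm.length i) _ (by omega)]
        have htake : (dm.drop i).take (scanB dm dm.length dm.length i - i) = (dm.drop i).takeWhile isFreeB := by
          rw [hjv, Nat.add_sub_cancel_left]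
          exact (List.prefix_iff_eq_take.mp (List.takeWhile_prefix _)).symm
        have hdropj : dm.drop (scanB dm dm.length dm.length i) = (dm.drop i).dropWhile isFreeB := by
          rw [hjv, ← List.drop_drop]
          exact drop_length_takeWhile_eq_dropWhile (dm.drop i)
        rw [htake, hdropj, goM_span (dm.drop i) []]
        simp [htw]
    · rw [loopB, if_neg h, List.drop_eq_nil_of_le (by omega)]
      simp [goM]

-- ===== VERDICT (by name: the statement is the Claim_ definition above) =====
theorem merge_space_spec : Claim_equal_merge_space := by
  intro dm _ _
  unfold Spec_merge_space merge_space merge_space_alt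
  have h := foldA_eq_goM dm [] []
  simp only at h
  rw [h, loopB_eq dm dm.length 0 [] (by omega)]
  simp
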